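-- pv_equiv track=rewrite | github.com/waelkedi/network2-rapport | make_filters.py | make_filters
-- ===== SOURCE A (Python) =====
-- def filter_client(CLIENT_IP, PROVIDER_IP, COMMERCIAL):
--   s = ""
--   # client router
--   s += "bgp router "+CLIENT_IP+"\n"
--   s += "	peer "+PROVIDER_IP+"\n"
--   # tag routes from provider, low preference
--   s += "		filter in add-rule\n"
--   s += "			match any\n"
--   s += "			action 'community add 2'\n"
--   if COMMERCIAL:
--     s += "			action 'local-pref 2'\n"
--   else:
--     s += "			action 'local-pref 50'\n"
--   s += "			exit\n" # exit filter
--   # do not share routes from peers to provider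
--   s += "		filter out add-rule\n"
--   s += "			match 'community is 1'\n"
--   s += "			action deny\n"
--   s += "			exit\n" # exit filter
--   # do not share routes from providers to provider
--   s += "		filter out add-rule\n"
--   s += "			match 'community is 2'\n"
--   s += "			action deny\n"
--   s += "			exit\n" # exit filter
--   s += "		exit\n" # exit peer
--   s += "	exit\n" # exit router
--   # return result
--   return s
--
-- def filter_provider(PROVIDER_IP, CLIENT_IP, COMMERCIAL):
--   s = ""
--   # provider router
--   s += "bgp router "+PROVIDER_IP+"\n"
--   s += "	peer "+CLIENT_IP+"\n"
--   # tag routes from client, high preference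
--   s += "		filter in add-rule\n"
--   s += "			match any\n"
--   s += "			action 'community add 0'\n"
--   if COMMERCIAL:
--     s += "			action 'local-pref 100'\n"
--   else:
--     s += "			action 'local-pref 50'\n"
--   s += "			exit\n" # exit filter
--   s += "		exit\n" # exit peer
--   s += "	exit\n" # exit router
--   # return result
--   return s
--
-- def filter_peers(PEER1_IP, PEER2_IP, COMMERCIAL):
--   s = ""
--   s += "bgp router "+PEER1_IP+"\n"
--   s += "	peer "+PEER2_IP+"\n"
--   # tag routes from peer, medium preference
--   s += "		filter in add-rule\n"
--   s += "			match any\n"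
--   s += "			action 'community add 1'\n"
--   if COMMERCIAL:
--     s += "			action 'local-pref 10'\n"
--   else:
--     s += "			action 'local-pref 50'\n"
--   s += "			exit\n" # exit filter
--   # do not share routes from peers to peer
--   s += "		filter out add-rule\n"
--   s += "			match 'community is 1'\n"
--   s += "			action deny\n"
--   s += "			exit\n" # exit filter
--   # do not share routes from providers to peer
--   s += "		filter out add-rule\n"
--   s += "			match 'community is 2'\n"
--   s += "			action deny\n"
--   s += "			exit\n" # exit filter
--   s += "		exit\n" # exit peer
--   s += "	exit\n" # exit router
--   return s
--
-- def make_filters(combinaisons):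
--   s = ""
--   for c in combinaisons:
--     # check relation
--     if c[7] == "0": # R1 client to R2
--       s += filter_client(c[0], c[1], c[8])
--       s += filter_provider(c[1], c[0], c[8])
--     elif c[7] == "2": # R1 provider to R2
--       s += filter_client(c[1], c[0], c[8])
--       s += filter_provider(c[0], c[1], c[8])
--     elif c[7] == "1": # pairs
--       s += filter_peers(c[1], c[0], c[8])
--       s += filter_peers(c[0], c[1], c[8])
--     s += "\n"
--   return s
-- ===== SOURCE B (Python) =====
-- # Table-driven builder: one generic per-router block function + a relation table
-- # replaces the three hand-written helper functions of A.
--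
-- # relation code -> ordered pair of specs:
-- # (own_is_first_ip, community_add, commercial_pref, noncommercial_pref, deny_communities)
-- _TABLE = {
--     "0": [(True, "2", "2", "50", ["1", "2"]), (False, "0", "100", "50", [])],
--     "2": [(False, "2", "2", "50", ["1", "2"]), (True, "0", "100", "50", [])],
--     "1": [(False, "1", "10", "50", ["1", "2"]), (True, "1", "10", "50", ["1", "2"])],
-- }
--
-- def _block(own_ip, peer_ip, community, pref_c, pref_nc, denies, commercial):
--     lines = [
--         "bgp router " + own_ip,
--         "\tpeer " + peer_ip,
--         "\t\tfilter in add-rule",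
--         "\t\t\tmatch any",
--         "\t\t\taction 'community add " + community + "'",
--         "\t\t\taction 'local-pref " + (pref_c if commercial else pref_nc) + "'",
--         "\t\t\texit",
--     ]
--     for d in denies:
--         lines += [
--             "\t\tfilter out add-rule",
--             "\t\t\tmatch 'community is " + d + "'",
--             "\t\t\taction deny",
--             "\t\t\texit",
--         ]
--     lines += ["\t\texit", "\texit"]
--     return "\n".join(lines) + "\n"
--
-- def make_filters(combinaisons):
--     parts = []
--     for c in combinaisons:
--         for (own_first, community, pref_c, pref_nc, denies) in _TABLE.get(c[7], []):
--             own, peer = (c[0], c[1]) if own_first else (c[1], c[0])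
--             parts.append(_block(own, peer, community, pref_c, pref_nc, denies, c[8]))
--         parts.append("\n")
--     return "".join(parts)
-- ===== Notes on version B (the rewrite author's own statement) =====
-- stated objective: simpler
-- what changed: Replaced A's three hand-written per-role helper functions by a relation table mapping each code to two router specs plus one generic block builder that joins the lines and emits one deny block per listed community.
import Mathlib
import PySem

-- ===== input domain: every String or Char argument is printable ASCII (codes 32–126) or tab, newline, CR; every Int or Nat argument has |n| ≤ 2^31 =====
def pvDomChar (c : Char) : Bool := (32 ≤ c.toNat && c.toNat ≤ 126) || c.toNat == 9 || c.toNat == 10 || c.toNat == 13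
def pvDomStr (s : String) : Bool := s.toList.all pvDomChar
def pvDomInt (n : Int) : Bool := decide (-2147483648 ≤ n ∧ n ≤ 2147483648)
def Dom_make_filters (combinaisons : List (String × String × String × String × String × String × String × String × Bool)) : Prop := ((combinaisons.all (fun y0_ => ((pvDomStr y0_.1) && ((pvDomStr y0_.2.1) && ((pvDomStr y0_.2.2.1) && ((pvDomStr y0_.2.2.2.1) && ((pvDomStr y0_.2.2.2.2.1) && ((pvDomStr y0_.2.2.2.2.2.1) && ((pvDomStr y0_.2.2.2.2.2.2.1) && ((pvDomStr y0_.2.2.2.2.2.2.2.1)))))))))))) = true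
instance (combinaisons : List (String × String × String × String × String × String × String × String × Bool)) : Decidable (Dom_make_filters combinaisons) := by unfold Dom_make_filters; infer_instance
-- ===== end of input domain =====

-- B replaces A's three hand-written helper functions by one table of per-relation
-- router specs and a single generic block builder (objective: simpler/table-driven).

-- ===== PORT A =====
def filter_client (CLIENT_IP PROVIDER_IP : String) (COMMERCIAL : Bool) : String :=
  let s := ""
  let s := s ++ "bgp router " ++ CLIENT_IP ++ "\n"
  let s := s ++ "\tpeer " ++ PROVIDER_IP ++ "\n"
  let s := s ++ "\t\tfilter in add-rule\n"
  let s := s ++ "\t\t\tmatch any\n"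
  let s := s ++ "\t\t\taction 'community add 2'\n"
  let s := if COMMERCIAL then s ++ "\t\t\taction 'local-pref 2'\n"
           else s ++ "\t\t\taction 'local-pref 50'\n"
  let s := s ++ "\t\t\texit\n"
  let s := s ++ "\t\tfilter out add-rule\n"
  let s := s ++ "\t\t\tmatch 'community is 1'\n"
  let s := s ++ "\t\t\taction deny\n"
  let s := s ++ "\t\t\texit\n"
  let s := s ++ "\t\tfilter out add-rule\n"
  let s := s ++ "\t\t\tmatch 'community is 2'\n"
  let s := s ++ "\t\t\taction deny\n"
  let s := s ++ "\t\t\texit\n"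
  let s := s ++ "\t\texit\n"
  let s := s ++ "\texit\n"
  s

def filter_provider (PROVIDER_IP CLIENT_IP : String) (COMMERCIAL : Bool) : String :=
  let s := ""
  let s := s ++ "bgp router " ++ PROVIDER_IP ++ "\n"
  let s := s ++ "\tpeer " ++ CLIENT_IP ++ "\n"
  let s := s ++ "\t\tfilter in add-rule\n"
  let s := s ++ "\t\t\tmatch any\n"
  let s := s ++ "\t\t\taction 'community add 0'\n"
  let s := if COMMERCIAL then s ++ "\t\t\taction 'local-pref 100'\n"
           else s ++ "\t\t\taction 'local-pref 50'\n"
  let s := s ++ "\t\t\texit\n"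
  let s := s ++ "\t\texit\n"
  let s := s ++ "\texit\n"
  s

def filter_peers (PEER1_IP PEER2_IP : String) (COMMERCIAL : Bool) : String :=
  let s := ""
  let s := s ++ "bgp router " ++ PEER1_IP ++ "\n"
  let s := s ++ "\tpeer " ++ PEER2_IP ++ "\n"
  let s := s ++ "\t\tfilter in add-rule\n"
  let s := s ++ "\t\t\tmatch any\n"
  let s := s ++ "\t\t\taction 'community add 1'\n"
  let s := if COMMERCIAL then s ++ "\t\t\taction 'local-pref 10'\n"
           else s ++ "\t\t\taction 'local-pref 50'\n"
  let s := s ++ "\t\t\texit\n"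
  let s := s ++ "\t\tfilter out add-rule\n"
  let s := s ++ "\t\t\tmatch 'community is 1'\n"
  let s := s ++ "\t\t\taction deny\n"
  let s := s ++ "\t\t\texit\n"
  let s := s ++ "\t\tfilter out add-rule\n"
  let s := s ++ "\t\t\tmatch 'community is 2'\n"
  let s := s ++ "\t\t\taction deny\n"
  let s := s ++ "\t\t\texit\n"
  let s := s ++ "\t\texit\n"
  let s := s ++ "\texit\n"
  s

def make_filters (combinaisons : List (String × String × String × String × String × String × String × String × Bool)) : String :=
  combinaisons.foldl (fun s c =>
    let s :=
      if c.2.2.2.2.2.2.2.1 = "0" then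
        s ++ filter_client c.1 c.2.1 c.2.2.2.2.2.2.2.2 ++ filter_provider c.2.1 c.1 c.2.2.2.2.2.2.2.2
      else if c.2.2.2.2.2.2.2.1 = "2" then
        s ++ filter_client c.2.1 c.1 c.2.2.2.2.2.2.2.2 ++ filter_provider c.1 c.2.1 c.2.2.2.2.2.2.2.2
      else if c.2.2.2.2.2.2.2.1 = "1" then
        s ++ filter_peers c.2.1 c.1 c.2.2.2.2.2.2.2.2 ++ filter_peers c.1 c.2.1 c.2.2.2.2.2.2.2.2
      else s
    s ++ "\n") ""

-- ===== PORT B =====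
-- relation code -> ordered pair of specs (own_is_first_ip, community_add, pref_commercial, pref_noncommercial, deny_communities)
def pvTable : PySem.Dict String (List (Bool × String × String × String × List String)) :=
  PySem.Dict.ofList
    [ ("0", [(true,  "2", "2",   "50", ["1", "2"]), (false, "0", "100", "50", [])]),
      ("2", [(false, "2", "2",   "50", ["1", "2"]), (true,  "0", "100", "50", [])]),
      ("1", [(false, "1", "10",  "50", ["1", "2"]), (true,  "1", "10",  "50", ["1", "2"])]) ]

def pvBlock (own_ip peer_ip community pref_c pref_nc : String) (denies : List String) (commercial : Bool) : String :=
  let lines := [ "bgp router " ++ own_ip,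
                 "\tpeer " ++ peer_ip,
                 "\t\tfilter in add-rule",
                 "\t\t\tmatch any",
                 "\t\t\taction 'community add " ++ community ++ "'",
                 "\t\t\taction 'local-pref " ++ (if commercial then pref_c else pref_nc) ++ "'",
                 "\t\t\texit" ]
  let lines := denies.foldl (fun ls d =>
    ls ++ [ "\t\tfilter out add-rule",
            "\t\t\tmatch 'community is " ++ d ++ "'",
            "\t\t\taction deny",
            "\t\t\texit" ]) lines
  let lines := lines ++ ["\t\texit", "\texit"]
  PySem.Str.join "\n" lines ++ "\n"

def make_filters_alt (combinaisons : List (String × String × String × String × String × String × String × String × Bool)) : String :=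
  let parts := combinaisons.foldl (fun parts c =>
    let parts := (PySem.Dict.getD pvTable c.2.2.2.2.2.2.2.1 []).foldl (fun ps spec =>
      let own  := if spec.1 then c.1 else c.2.1
      let peer := if spec.1 then c.2.1 else c.1
      ps ++ [pvBlock own peer spec.2.1 spec.2.2.1 spec.2.2.2.1 spec.2.2.2.2 c.2.2.2.2.2.2.2.2]) parts
    parts ++ ["\n"]) []
  PySem.Str.join "" parts

-- ===== PRECONDITION & SPEC =====
def Spec_make_filters (combinaisons : List (String × String × String × String × String × String × String × String × Bool)) (out : String) : Prop := out = make_filters_alt combinaisons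
instance (combinaisons : List (String × String × String × String × String × String × String × String × Bool)) (out : String) : Decidable (Spec_make_filters combinaisons out) := by unfold Spec_make_filters; infer_instance

-- ===== CLAIM (what is proved, stated in full; the proofs are below) =====
def Claim_equal_make_filters : Prop := ∀ (combinaisons : List (String × String × String × String × String × String × String × String × Bool)), Dom_make_filters combinaisons → Spec_make_filters combinaisons (make_filters combinaisons)

-- ===== LEMMAS AND PROOFS =====

-- per-combination string emitted by A
def pvEntryA (c : String × String × String × String × String × String × String × String × Bool) : String :=
  (if c.2.2.2.2.2.2.2.1 = "0" then
    filter_client c.1 c.2.1 c.2.2.2.2.2.2.2.2 ++ filter_provider c.2.1 c.1 c.2.2.2.2.2.2.2.2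
  else if c.2.2.2.2.2.2.2.1 = "2" then
    filter_client c.2.1 c.1 c.2.2.2.2.2.2.2.2 ++ filter_provider c.1 c.2.1 c.2.2.2.2.2.2.2.2
  else if c.2.2.2.2.2.2.2.1 = "1" then
    filter_peers c.2.1 c.1 c.2.2.2.2.2.2.2.2 ++ filter_peers c.1 c.2.1 c.2.2.2.2.2.2.2.2
  else "") ++ "\n"

-- per-combination list of parts emitted by B
def pvEntryB (c : String × String × String × String × String × String × String × String × Bool) : List String :=
  (PySem.Dict.getD pvTable c.2.2.2.2.2.2.2.1 []).map (fun spec =>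
    pvBlock (if spec.1 then c.1 else c.2.1) (if spec.1 then c.2.1 else c.1)
      spec.2.1 spec.2.2.1 spec.2.2.2.1 spec.2.2.2.2 c.2.2.2.2.2.2.2.2) ++ ["\n"]

lemma pvA_foldl (l : List (String × String × String × String × String × String × String × String × Bool)) (acc : String) :
    l.foldl (fun s c =>
      let s :=
        if c.2.2.2.2.2.2.2.1 = "0" then
          s ++ filter_client c.1 c.2.1 c.2.2.2.2.2.2.2.2 ++ filter_provider c.2.1 c.1 c.2.2.2.2.2.2.2.2
        else if c.2.2.2.2.2.2.2.1 = "2" then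
          s ++ filter_client c.2.1 c.1 c.2.2.2.2.2.2.2.2 ++ filter_provider c.1 c.2.1 c.2.2.2.2.2.2.2.2
        else if c.2.2.2.2.2.2.2.1 = "1" then
          s ++ filter_peers c.2.1 c.1 c.2.2.2.2.2.2.2.2 ++ filter_peers c.1 c.2.1 c.2.2.2.2.2.2.2.2
        else s
      s ++ "\n") acc = acc ++ (l.map pvEntryA).foldr (· ++ ·) "" := by
  induction l generalizing acc with
  | nil => simp
  | cons c t ih =>
      simp only [List.foldl_cons, List.map_cons, List.foldr_cons, ih]
      unfold pvEntryA
      split_ifs <;> simp [String.append_assoc]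

lemma pvB_foldl (l : List (String × String × String × String × String × String × String × String × Bool)) (acc : List String) :
    l.foldl (fun parts c =>
      let parts := (PySem.Dict.getD pvTable c.2.2.2.2.2.2.2.1 []).foldl (fun ps spec =>
        let own  := if spec.1 then c.1 else c.2.1
        let peer := if spec.1 then c.2.1 else c.1
        ps ++ [pvBlock own peer spec.2.1 spec.2.2.1 spec.2.2.2.1 spec.2.2.2.2 c.2.2.2.2.2.2.2.2]) parts
      parts ++ ["\n"]) acc = acc ++ l.flatMap pvEntryB := by
  have hbody : (fun (parts : List String) (c : String × String × String × String × String × String × String × String × Bool) =>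
      (PySem.Dict.getD pvTable c.2.2.2.2.2.2.2.1 []).foldl (fun ps spec =>
        ps ++ [pvBlock (if spec.1 then c.1 else c.2.1) (if spec.1 then c.2.1 else c.1)
          spec.2.1 spec.2.2.1 spec.2.2.2.1 spec.2.2.2.2 c.2.2.2.2.2.2.2.2]) parts ++ ["
"])
      = fun parts c => parts ++ pvEntryB c := by
    funext parts c
    rw [PySem.List.foldl_append_singleton_eq_map]
    simp [pvEntryB]
  calc l.foldl _ acc = l.foldl (fun parts c => parts ++ pvEntryB c) acc := by rw [hbody]
    _ = acc ++ l.flatMap pvEntryB := PySem.List.foldl_append_eq_flatMap _ _ _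

lemma pvJoin_empty_cons (p : String) (rest : List String) :
    PySem.Str.join "" (p :: rest) = p ++ PySem.Str.join "" rest := by
  cases rest with
  | nil =>
      apply String.ext
      simp [PySem.Str.join, PySem.Chars.join_singleton, PySem.Chars.join_nil]
  | cons q r =>
      apply String.ext
      simp [PySem.Str.join, PySem.Chars.join_cons_cons]

lemma pvJoin_empty_append (xs ys : List String) :
    PySem.Str.join "" (xs ++ ys) = PySem.Str.join "" xs ++ PySem.Str.join "" ys := by
  induction xs with
  | nil =>
      apply String.ext
      simp [PySem.Str.join, PySem.Chars.join_nil]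
  | cons p t ih =>
      simp [pvJoin_empty_cons, ih, String.append_assoc]

lemma pvTable_lit : pvTable = PySem.Dict.mk
    [ ("0", [(true,  "2", "2",   "50", ["1", "2"]), (false, "0", "100", "50", [])]),
      ("2", [(false, "2", "2",   "50", ["1", "2"]), (true,  "0", "100", "50", [])]),
      ("1", [(false, "1", "10",  "50", ["1", "2"]), (true,  "1", "10",  "50", ["1", "2"])]) ] := by
  apply PySem.Dict.ext; rfl

lemma pvTable_getD_other (k : String) (h0 : ¬ k = "0") (h2 : ¬ k = "2") (h1 : ¬ k = "1") :
    PySem.Dict.getD pvTable k [] = [] := by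
  rw [pvTable_lit, PySem.Dict.getD_eq_get?_getD]
  simp only [PySem.Dict.get?_mk_cons]
  simp [beq_iff_eq, Ne.symm h0, Ne.symm h2, Ne.symm h1, PySem.Dict.get?]

set_option maxRecDepth 4096 in
lemma pvEntry_eq (c : String × String × String × String × String × String × String × String × Bool) :
    pvEntryA c = PySem.Str.join "" (pvEntryB c) := by
  obtain ⟨c0, c1, c2, c3, c4, c5, c6, c7, b⟩ := c
  unfold pvEntryA pvEntryB
  by_cases h0 : c7 = "0"
  · subst h0
    rw [show PySem.Dict.getD pvTable "0" [] =
      [(true,  "2", "2",   "50", ["1", "2"]), (false, "0", "100", "50", [])] from rfl]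
    cases b
    all_goals apply String.ext
    all_goals simp [pvBlock, filter_client, filter_provider,
        PySem.Str.join, PySem.Chars.join, List.intercalate, List.intersperse]
  · by_cases h2 : c7 = "2"
    · subst h2
      rw [show PySem.Dict.getD pvTable "2" [] =
        [(false, "2", "2",   "50", ["1", "2"]), (true,  "0", "100", "50", [])] from rfl]
      simp only [h0, if_false]
      cases b
      all_goals apply String.ext
      all_goals simp [pvBlock, filter_client, filter_provider,
          PySem.Str.join, PySem.Chars.join, List.intercalate, List.intersperse]
    · by_cases h1 : c7 = "1"
      · subst h1
        rw [show PySem.Dict.getD pvTable "1" [] =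
          [(false, "1", "10",  "50", ["1", "2"]), (true,  "1", "10",  "50", ["1", "2"])] from rfl]
        simp only [h0, h2, if_false, reduceIte]
        cases b
        all_goals apply String.ext
        all_goals simp [pvBlock, filter_peers,
            PySem.Str.join, PySem.Chars.join, List.intercalate, List.intersperse]
      · rw [pvTable_getD_other c7 h0 h2 h1]
        apply String.ext
        simp [h0, h1, h2, PySem.Str.join, PySem.Chars.join, List.intercalate]

lemma pvJoin_flatMap (l : List (String × String × String × String × String × String × String × String × Bool)) :
    PySem.Str.join "" (l.flatMap pvEntryB) = (l.map pvEntryA).foldr (· ++ ·) "" := by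
  induction l with
  | nil =>
      apply String.ext
      simp [PySem.Str.join, PySem.Chars.join_nil]
  | cons c t ih =>
      simp [List.flatMap_cons, pvJoin_empty_append, ih, pvEntry_eq]

-- ===== VERDICT (by name: the statement is the Claim_ definition above) =====
theorem make_filters_spec : Claim_equal_make_filters := by
  intro combinaisons _
  unfold Spec_make_filters make_filters make_filters_alt
  rw [pvA_foldl, pvB_foldl]
  simp [pvJoin_flatMap]
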